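-- pv_equiv track=rewrite | github.com/thaReal/MasterChef | codeforces/round_632/little.py | solve
-- ===== SOURCE A (Python) =====
-- def solve(n, m):
-- 	sol = []
-- 	val = 'B'
-- 	for i in range(n):
-- 		line = []
-- 		for j in range(m):
-- 			line.append(val)
-- 			val = 'W' if val == 'B' else 'B'
--
-- 		sol.append(line)
--
-- 		if m % 2 == 0:
-- 			val = 'W' if val == 'B' else 'B'
--
-- 	if m*n % 2 == 0:
-- 		sol[0][1] = 'B'
--
-- 	return sol
-- ===== SOURCE B (Python) =====
-- def solve(n, m):
--     width = max(m, 0)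
--     pattern = 'BW' * ((n + width) // 2 + 1) if n > 0 else ''
--     sol = [list(pattern[i:i + width]) for i in range(n)]
--     if m * n % 2 == 0:
--         sol[0][1] = 'B'
--     return sol
-- ===== Notes on version B (the rewrite author's own statement) =====
-- stated objective: alternative
-- what changed: B builds one periodic 'BWBW...' pattern string once and makes each row a sliding-window slice pattern[i:i+width] of it, instead of A's per-cell stateful toggling value threaded across cells with a per-row m%2 correction; the final even-area override is kept identical.
import Mathlib
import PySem

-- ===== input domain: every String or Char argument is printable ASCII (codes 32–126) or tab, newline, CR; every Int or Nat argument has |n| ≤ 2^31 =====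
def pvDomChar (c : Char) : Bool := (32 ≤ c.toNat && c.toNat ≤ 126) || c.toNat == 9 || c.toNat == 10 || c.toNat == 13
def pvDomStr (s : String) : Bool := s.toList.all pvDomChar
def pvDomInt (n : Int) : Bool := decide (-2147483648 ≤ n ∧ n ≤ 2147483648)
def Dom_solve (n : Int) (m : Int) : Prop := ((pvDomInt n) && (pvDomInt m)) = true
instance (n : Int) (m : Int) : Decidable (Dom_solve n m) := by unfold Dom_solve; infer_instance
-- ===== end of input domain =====

-- B builds one periodic 'BW...' pattern string and takes a sliding window slice of it
-- per row, instead of A's stateful toggling value with the per-row m%2 correction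
-- (objective: simpler).

-- ===== PORT A =====
-- val = 'W' if val == 'B' else 'B'
def pvToggle (v : String) : String := if v == "B" then "W" else "B"

-- the inner 'for j in range(m)' loop of A, building one row from the running val
def pvInner (m : Int) (v : String) : List String × String :=
  (PySem.List.pyRange 0 m 1).foldl
    (fun (st2 : List String × String) _j => (st2.1 ++ [st2.2], pvToggle st2.2)) ([], v)

-- one iteration of A's outer 'for i in range(n)' loop
def pvStep (m : Int) (st : List (List String) × String) (_i : Int) :
    List (List String) × String :=
  let inner := pvInner m st.2
  (st.1 ++ [inner.1], if PySem.Int.mod m 2 == 0 then pvToggle inner.2 else inner.2)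

def solve (n : Int) (m : Int) : List (List String) :=
  let sol := ((PySem.List.pyRange 0 n 1).foldl (pvStep m) ([], "B")).1
  if PySem.Int.mod (m * n) 2 == 0 then
    -- sol[0][1] = 'B' (Pre_solve guarantees the indices are in range here)
    match sol with
    | [] => []
    | r :: rest => (r.set 1 "B") :: rest
  else sol

-- ===== PORT B =====
def solve_alt (n : Int) (m : Int) : List (List String) :=
  -- width = max(m, 0)
  let width : Int := max m 0
  -- pattern = 'BW' * ((n + width) // 2 + 1) if n > 0 else ''; a string is its list of code points
  let pattern : List Char :=
    if 0 < n then (List.replicate (PySem.Int.floordiv (n + width) 2 + 1).toNat ['B', 'W']).flatten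
    else []
  -- sol = [list(pattern[i:i + width]) for i in range(n)]
  let sol := (PySem.List.pyRange 0 n 1).map (fun i =>
    (PySem.List.slice pattern (some i) (some (i + width))).map (fun c => String.ofList [c]))
  if PySem.Int.mod (m * n) 2 == 0 then
    -- sol[0][1] = 'B' (Pre_solve guarantees the indices are in range here)
    match sol with
    | [] => []
    | r :: rest => (r.set 1 "B") :: rest
  else sol

-- ===== PRECONDITION & SPEC =====
-- Pre_ excludes exactly the inputs on which the Python A raises IndexError at
-- sol[0][1] = 'B' (m*n even with n < 1 or m < 2); the Python B raises there too.
def Pre_solve (n : Int) (m : Int) : Prop :=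
  PySem.Int.mod (m * n) 2 ≠ 0 ∨ (1 ≤ n ∧ 2 ≤ m)
instance (n : Int) (m : Int) : Decidable (Pre_solve n m) := by unfold Pre_solve; infer_instance
def pvWitness_solve : Int × Int := (3, 4)

def Spec_solve (n : Int) (m : Int) (out : List (List String)) : Prop := out = solve_alt n m
instance (n : Int) (m : Int) (out : List (List String)) : Decidable (Spec_solve n m out) := by unfold Spec_solve; infer_instance

-- ===== CLAIM (what is proved, stated in full; the proofs are below) =====
def Claim_equal_solve : Prop := ∀ (n : Int) (m : Int), Dom_solve n m → Pre_solve n m → Spec_solve n m (solve n m)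

-- ===== LEMMAS AND PROOFS =====

-- parity colour: the colour t toggle steps after the starting 'B'
def pvCol (t : Nat) : String := if t % 2 == 0 then "B" else "W"

theorem pvToggle_pvCol (t : Nat) : pvToggle (pvCol t) = pvCol (t + 1) := by
  unfold pvCol pvToggle
  rcases Nat.even_or_odd t with h | h
  · have h2 : t % 2 = 0 := Nat.even_iff.mp h
    simp [h2, Nat.add_mod]
  · have h2 : t % 2 = 1 := Nat.odd_iff.mp h
    simp [h2, Nat.add_mod]

theorem pvCol_congr {a b : Nat} (h : a % 2 = b % 2) : pvCol a = pvCol b := by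
  unfold pvCol; rw [h]

theorem map_range_shift {α : Type} (f : Nat → α) (k : Nat) :
    (List.range (k + 1)).map f = f 0 :: (List.range k).map (fun i => f (i + 1)) := by
  simp [List.range_succ_eq_map, List.map_map, Function.comp]

theorem inner_fold (L : List Int) (acc : List String) (t : Nat) :
    L.foldl (fun (st2 : List String × String) _j => (st2.1 ++ [st2.2], pvToggle st2.2))
      (acc, pvCol t)
    = (acc ++ (List.range L.length).map (fun j => pvCol (t + j)), pvCol (t + L.length)) := by
  induction L generalizing acc t with
  | nil => simp
  | cons x L ih =>
    simp only [List.foldl_cons]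
    rw [pvToggle_pvCol, ih (acc ++ [pvCol t]) (t + 1)]
    simp only [Prod.mk.injEq]
    constructor
    · simp only [List.length_cons]
      rw [map_range_shift]
      simp only [List.append_assoc, List.cons_append, List.nil_append]
      congr 2
      apply List.map_congr_left; intro i _; exact pvCol_congr (by omega)
    · simp only [List.length_cons]; exact pvCol_congr (by omega)

theorem pvInner_eq (m : Int) (t : Nat) :
    pvInner m (pvCol t)
    = ((List.range m.toNat).map (fun j => pvCol (t + j)), pvCol (t + m.toNat)) := by
  unfold pvInner
  rw [inner_fold]
  have hlen : (PySem.List.pyRange 0 m 1).length = m.toNat := by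
    rw [PySem.List.length_pyRange_one]; congr 1; omega
  rw [hlen]
  simp

-- for m ≥ 1 one outer iteration appends the alternating row and flips the start colour
theorem pvStep_eq (m : Int) (hm : 1 ≤ m) (acc : List (List String)) (t : Nat) (x : Int) :
    pvStep m (acc, pvCol t) x
    = (acc ++ [(List.range m.toNat).map (fun j => pvCol (t + j))], pvCol (t + 1)) := by
  unfold pvStep
  simp only [pvInner_eq m t]
  have hmod : PySem.Int.mod m 2 = m % 2 := PySem.Int.mod_eq_emod_of_pos (by omega)
  by_cases h : m % 2 = 0
  · have hM : m.toNat % 2 = 0 := by omega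
    simp only [hmod, h]
    rw [show (((0:Int) == 0) = true) from by rfl]
    simp only [if_true, pvToggle_pvCol, Prod.mk.injEq]
    exact ⟨by trivial, pvCol_congr (by omega)⟩
  · have h1 : m % 2 = 1 := by omega
    have hM : m.toNat % 2 = 1 := by omega
    simp only [hmod, h1]
    rw [show (((1:Int) == 0) = false) from by rfl]
    simp only [Bool.false_eq_true, if_false, Prod.mk.injEq]
    exact ⟨by trivial, pvCol_congr (by omega)⟩

theorem outer_fold (m : Int) (hm : 1 ≤ m) (L : List Int) (acc : List (List String)) (t : Nat) :
    L.foldl (pvStep m) (acc, pvCol t)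
    = (acc ++ (List.range L.length).map
        (fun r => (List.range m.toNat).map (fun j => pvCol (t + r + j))),
       pvCol (t + L.length)) := by
  induction L generalizing acc t with
  | nil => simp
  | cons x L ih =>
    rw [List.foldl_cons, pvStep_eq m hm acc t x, ih _ (t + 1)]
    simp only [Prod.mk.injEq]
    constructor
    · simp only [List.length_cons]
      rw [map_range_shift]
      simp only [List.append_assoc, List.cons_append, List.nil_append]
      congr 1
      congr 1
      apply List.map_congr_left; intro r _
      apply List.map_congr_left; intro j _; exact pvCol_congr (by omega)
    · simp only [List.length_cons]; exact pvCol_congr (by omega)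

-- for m ≤ 0 every appended row is empty
theorem outer_fold_empty (m : Int) (hm : m ≤ 0) (L : List Int) (acc : List (List String))
    (v : String) :
    (L.foldl (pvStep m) (acc, v)).1 = acc ++ List.replicate L.length [] := by
  induction L generalizing acc v with
  | nil => simp
  | cons x L ih =>
    rw [List.foldl_cons]
    have hstep : (pvStep m (acc, v) x).1 = acc ++ [[]] := by
      unfold pvStep pvInner
      rw [PySem.List.pyRange_one_eq_nil (by omega)]
      rfl
    have : pvStep m (acc, v) x = (acc ++ [[]], (pvStep m (acc, v) x).2) := by
      rw [← hstep]
    rw [this, ih]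
    simp [List.replicate_succ]

theorem pyRange_to_range (c : Int) :
    PySem.List.pyRange 0 c 1 = (List.range c.toNat).map (fun k : Nat => (k : Int)) := by
  rw [PySem.List.pyRange_one]
  have : (c - 0).toNat = c.toNat := by omega
  rw [this]
  simp

-- character t of the periodic pattern 'BW'•k
theorem pat_getElem? (k t : Nat) :
    ((List.replicate k (['B', 'W'] : List Char)).flatten)[t]?
    = if t < 2 * k then some (if t % 2 = 0 then 'B' else 'W') else none := by
  induction k generalizing t with
  | zero => simp
  | succ k ih =>
    rw [List.replicate_succ, List.flatten_cons]
    match t with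
    | 0 => simp
    | 1 => simp; omega
    | (t + 2) =>
      have hstep : (('B' :: 'W' :: []) ++ (List.replicate k (['B', 'W'] : List Char)).flatten)[t + 2]?
          = ((List.replicate k (['B', 'W'] : List Char)).flatten)[t]? := by
        simp
      rw [hstep, ih]
      have hmod : (t + 2) % 2 = t % 2 := by omega
      by_cases h : t < 2 * k
      · simp [h, hmod, show t + 2 < 2 * (k + 1) from by omega]
      · simp [h, show ¬(t + 2 < 2 * (k + 1)) from by omega]

-- a length-mN window of the pattern at offset r is the alternating row starting at pvCol r
theorem pat_window (k r mN : Nat) (h : r + mN ≤ 2 * k) :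
    ((((List.replicate k (['B', 'W'] : List Char)).flatten).drop r).take mN).map
      (fun c => String.ofList [c])
    = (List.range mN).map (fun j => pvCol (r + j)) := by
  have hrow : (((List.replicate k (['B', 'W'] : List Char)).flatten).drop r).take mN
      = (List.range mN).map (fun j => if (r + j) % 2 = 0 then 'B' else 'W') := by
    apply List.ext_getElem?
    intro j
    rw [List.getElem?_take, List.getElem?_drop, pat_getElem?]
    by_cases hj : j < mN
    · rw [if_pos hj, if_pos (by omega)]
      simp [hj]
    · rw [if_neg hj]
      simp [hj]
  rw [hrow, List.map_map]
  apply List.map_congr_left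
  intro j _
  simp only [Function.comp]
  unfold pvCol
  by_cases h2 : (r + j) % 2 = 0
  · simp [h2]
  · simp [h2]

-- the two grids (before the final override) coincide, for every n and m
theorem grids_eq (n m : Int) :
    ((PySem.List.pyRange 0 n 1).foldl (pvStep m) ([], "B")).1
    = (PySem.List.pyRange 0 n 1).map (fun i =>
        (PySem.List.slice
          (if 0 < n then
            (List.replicate (PySem.Int.floordiv (n + max m 0) 2 + 1).toNat
              (['B', 'W'] : List Char)).flatten
           else [])
          (some i) (some (i + max m 0))).map (fun c => String.ofList [c])) := by
  have hB : ("B" : String) = pvCol 0 := rfl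
  have hlen : (PySem.List.pyRange 0 n 1).length = n.toNat := by
    rw [PySem.List.length_pyRange_one]; congr 1; omega
  by_cases hn0 : 0 < n
  case neg =>
    rw [PySem.List.pyRange_one_eq_nil (by omega)]
    rfl
  rw [if_pos hn0]
  set k : Nat := (PySem.Int.floordiv (n + max m 0) 2 + 1).toNat with hk
  by_cases hm : 1 ≤ m
  · have hw : max m 0 = m := by omega
    conv_lhs => rw [hB]
    rw [outer_fold m hm, hlen]
    simp only [List.nil_append]
    conv_rhs => rw [pyRange_to_range n]
    rw [List.map_map]
    apply List.map_congr_left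
    intro r hr
    simp only [Function.comp, hw]
    -- window bound: r + m.toNat ≤ 2 * k
    have hfd : PySem.Int.floordiv (n + max m 0) 2 = (n + m) / 2 := by
      rw [hw]; exact PySem.Int.floordiv_eq_ediv_of_pos (by omega)
    have hrlt : r < n.toNat := List.mem_range.mp hr
    have h2k : (n + m : Int) + 1 ≤ 2 * (PySem.Int.floordiv (n + max m 0) 2 + 1) := by
      rw [hfd]; omega
    have hbound : r + m.toNat ≤ 2 * k := by
      rw [hk]; omega
    have hcast : ((r : Int)) + m = ((r : Int)) + ((m.toNat : Nat) : Int) := by omega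
    rw [hcast, PySem.List.slice_natCast_add, pat_window k r m.toNat hbound]
    apply List.map_congr_left
    intro j _
    exact pvCol_congr (by omega)
  · have hw : max m 0 = 0 := by omega
    conv_lhs => rw [hB]
    rw [outer_fold_empty m (by omega), hlen]
    simp only [List.nil_append]
    conv_rhs => rw [pyRange_to_range n]
    rw [List.map_map]
    symm
    rw [List.eq_replicate_iff]
    refine ⟨by simp, ?_⟩
    intro b hb
    simp only [List.mem_map] at hb
    obtain ⟨x, _, hx⟩ := hb
    rw [← hx]
    simp only [Function.comp, hw, add_zero]
    rw [PySem.List.slice_natCast]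
    simp

-- ===== VERDICT (by name: the statement is the Claim_ definition above) =====
theorem solve_spec : Claim_equal_solve := by
  intro n m _ _
  unfold Spec_solve solve solve_alt
  simp only
  rw [grids_eq n m]
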